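-- pv_equiv track=rewrite | github.com/ShivanshP1/RobotCar | test scripts/BitMapMakerFinal.py | pool_bitmap
-- ===== SOURCE A (Python) =====
-- def pool_bitmap(pixels, width, height, pool_size):
--     pooled_pixels = []
--     for y in range(0, height, pool_size):
--         pooled_row = []
--         for x in range(0, width, pool_size):
--             block = [pixels[(y+i)*width + (x+j)] for i in range(pool_size) for j in range(pool_size) if y+i < height and x+j < width]
--             pooled_value = 1 if any(pixel == 255 for pixel in block) else 0
--             pooled_row.append(pooled_value)
--         pooled_pixels.append(pooled_row)
--     return pooled_pixels
-- ===== SOURCE B (Python) =====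
-- def pool_bitmap(pixels, width, height, pool_size):
--     # Single flat scatter pass instead of per-block gather+any.
--     rows = len(range(0, height, pool_size))
--     cols = len(range(0, width, pool_size))
--     pooled_pixels = [[0] * cols for _ in range(rows)]
--     if pool_size > 0 and width > 0:
--         # otherwise the grid is degenerate (empty rows or all zeros); nothing to scatter
--         for y in range(height):
--             for x in range(width):
--                 if pixels[y * width + x] == 255:
--                     pooled_pixels[y // pool_size][x // pool_size] = 1
--     return pooled_pixels
-- ===== Notes on version B (the rewrite author's own statement) =====
-- stated objective: alternative
-- what changed: A gathers each pooled block with a nested comprehension and tests any(==255); B pre-allocates a rows x cols zero grid and makes one flat pass over all pixel coordinates, scattering a 1 into cell (y//pool_size, x//pool_size) whenever the pixel is 255.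
import Mathlib
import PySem

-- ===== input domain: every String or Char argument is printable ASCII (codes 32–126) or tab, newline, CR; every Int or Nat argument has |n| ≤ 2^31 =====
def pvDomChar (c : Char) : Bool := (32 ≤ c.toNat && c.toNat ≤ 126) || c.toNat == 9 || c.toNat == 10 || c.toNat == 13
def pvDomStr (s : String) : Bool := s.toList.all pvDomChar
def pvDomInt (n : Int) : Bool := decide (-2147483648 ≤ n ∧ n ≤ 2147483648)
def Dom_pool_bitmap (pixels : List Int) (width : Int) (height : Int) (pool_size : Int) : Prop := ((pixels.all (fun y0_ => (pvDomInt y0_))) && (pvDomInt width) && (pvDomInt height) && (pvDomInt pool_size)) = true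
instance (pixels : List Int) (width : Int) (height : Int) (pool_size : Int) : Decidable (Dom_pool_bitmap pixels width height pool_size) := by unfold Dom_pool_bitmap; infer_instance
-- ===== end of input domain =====

-- B replaces A's per-block gather-and-any with a single flat scatter pass over the pixel
-- grid into a pre-allocated zero grid (objective: alternative decomposition, same cost class).

-- ===== PORT A =====
def pool_bitmap (pixels : List Int) (width : Int) (height : Int) (pool_size : Int) : List (List Int) :=
  (PySem.List.pyRange 0 height pool_size).foldl (fun pooled_pixels y =>
    pooled_pixels ++ [(PySem.List.pyRange 0 width pool_size).foldl (fun pooled_row x =>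
      let block : List Int := (PySem.List.pyRange 0 pool_size 1).flatMap (fun i =>
        ((PySem.List.pyRange 0 pool_size 1).filter (fun j => decide (y + i < height ∧ x + j < width))).map
          (fun j => PySem.List.pyGetD pixels ((y + i) * width + (x + j)) 0))
      let pooled_value : Int := if block.any (fun pixel => pixel == 255) then 1 else 0
      pooled_row ++ [pooled_value]) []]) []

-- ===== PORT B =====
def pool_bitmap_alt (pixels : List Int) (width : Int) (height : Int) (pool_size : Int) : List (List Int) :=
  let rows := (PySem.List.pyRange 0 height pool_size).length
  let cols := (PySem.List.pyRange 0 width pool_size).length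
  let pooled_pixels := List.replicate rows (List.replicate cols (0 : Int))
  if pool_size > 0 ∧ width > 0 then
    (PySem.List.pyRange 0 height 1).foldl (fun g y =>
      (PySem.List.pyRange 0 width 1).foldl (fun g x =>
        if PySem.List.pyGetD pixels (y * width + x) 0 == 255 then
          -- here 0 ≤ y, 0 ≤ x and pool_size > 0, so Python's non-negative y // pool_size,
          -- x // pool_size are (floordiv …).toNat exactly
          g.modify (PySem.Int.floordiv y pool_size).toNat
            (fun row => row.set (PySem.Int.floordiv x pool_size).toNat 1)
        else g) g) pooled_pixels
  else pooled_pixels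

-- ===== PRECONDITION & SPEC =====
-- Pre_ excludes exactly the inputs where the Python A raises: pool_size = 0 (ValueError
-- from range) and, when pool_size, width, height are all positive, pixel lists shorter
-- than width*height (IndexError).
def Pre_pool_bitmap (pixels : List Int) (width : Int) (height : Int) (pool_size : Int) : Prop :=
  pool_size ≠ 0 ∧ (0 < pool_size → 0 < width → 0 < height → width * height ≤ (pixels.length : Int))
instance (pixels : List Int) (width : Int) (height : Int) (pool_size : Int) : Decidable (Pre_pool_bitmap pixels width height pool_size) := by unfold Pre_pool_bitmap; infer_instance

def pvWitness_pool_bitmap : List Int × Int × Int × Int := ([255, 0, 0, 255, 0, 0], 3, 2, 2)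

def Spec_pool_bitmap (pixels : List Int) (width : Int) (height : Int) (pool_size : Int) (out : List (List Int)) : Prop := out = pool_bitmap_alt pixels width height pool_size
instance (pixels : List Int) (width : Int) (height : Int) (pool_size : Int) (out : List (List Int)) : Decidable (Spec_pool_bitmap pixels width height pool_size out) := by unfold Spec_pool_bitmap; infer_instance

-- ===== CLAIM (what is proved, stated in full; the proofs are below) =====
def Claim_equal_pool_bitmap : Prop := ∀ (pixels : List Int) (width : Int) (height : Int) (pool_size : Int), Dom_pool_bitmap pixels width height pool_size → Pre_pool_bitmap pixels width height pool_size → Spec_pool_bitmap pixels width height pool_size (pool_bitmap pixels width height pool_size)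

-- ===== LEMMAS AND PROOFS =====

def cellA (pixels : List Int) (width height pool_size y x : Int) : Int :=
  if ((PySem.List.pyRange 0 pool_size 1).flatMap (fun i =>
        ((PySem.List.pyRange 0 pool_size 1).filter (fun j => decide (y + i < height ∧ x + j < width))).map
          (fun j => PySem.List.pyGetD pixels ((y + i) * width + (x + j)) 0))).any (fun pixel => pixel == 255)
  then 1 else 0

lemma flatten_map_singleton {α β : Type} (l : List α) (f : α → β) :
    (l.map (fun x => [f x])).flatten = l.map f := by
  induction l with
  | nil => rfl
  | cons a t ih => simp [ih]

lemma A_eq_map (pixels : List Int) (width height pool_size : Int) :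
    pool_bitmap pixels width height pool_size =
    (PySem.List.pyRange 0 height pool_size).map (fun y =>
      (PySem.List.pyRange 0 width pool_size).map (fun x => cellA pixels width height pool_size y x)) := by
  simp [pool_bitmap, cellA, flatten_map_singleton]

def stepx (pixels : List Int) (width ps y : Int) (g : List (List Int)) (x : Int) : List (List Int) :=
  if PySem.List.pyGetD pixels (y * width + x) 0 == 255 then
    g.modify (PySem.Int.floordiv y ps).toNat
      (fun row => row.set (PySem.Int.floordiv x ps).toNat 1)
  else g

lemma B_eq (pixels : List Int) (width height ps : Int) :
    pool_bitmap_alt pixels width height ps =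
    (if ps > 0 ∧ width > 0 then
      (PySem.List.pyRange 0 height 1).foldl (fun g y =>
        (PySem.List.pyRange 0 width 1).foldl (stepx pixels width ps y) g)
        (List.replicate (PySem.List.pyRange 0 height ps).length
          (List.replicate (PySem.List.pyRange 0 width ps).length (0 : Int)))
    else
      List.replicate (PySem.List.pyRange 0 height ps).length
        (List.replicate (PySem.List.pyRange 0 width ps).length (0 : Int))) := rfl

def cell (g : List (List Int)) (r c : Nat) : Int := (g.getD r []).getD c 0

-- update in range really writes
lemma cell_update (g : List (List Int)) (r' c' : Nat)
    (h1 : r' < g.length) (h2 : c' < (g.getD r' []).length) (r c : Nat) :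
    cell (g.modify r' (fun row => row.set c' 1)) r c =
      if r = r' ∧ c = c' then 1 else cell g r c := by
  have hg : g[r']? = some (g[r']'h1) := List.getElem?_eq_getElem h1
  have h2' : c' < (g[r']'h1).length := by
    simpa [List.getD_eq_getElem?_getD, hg] using h2
  by_cases hr : r = r'
  · subst hr
    simp only [cell, List.getD_eq_getElem?_getD, List.getElem?_modify, hg, if_pos rfl,
      Option.map_eq_map, Option.map_some, Option.getD_some, List.getElem?_set]
    by_cases hc : c = c'
    · simp [hc, h2', hg]
    · simp only [if_true, Option.map_some, Option.getD_some,
        hc, and_false, if_false]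
      rw [List.getElem?_set_ne (fun h => hc (Eq.symm h))]
  · have hr' : r' ≠ r := fun h => hr h.symm
    simp [cell, List.getD_eq_getElem?_getD, List.getElem?_modify, hr', hr]

-- modify never changes shape
lemma len_modify_set (g : List (List Int)) (r' c' : Nat) :
    (g.modify r' (fun row => row.set c' 1)).length = g.length := List.length_modify _ _ _

lemma rowlen_modify_set (g : List (List Int)) (r' c' r : Nat) :
    ((g.modify r' (fun row => row.set c' 1)).getD r []).length = (g.getD r []).length := by
  simp only [List.getD_eq_getElem?_getD, List.getElem?_modify]
  cases hg : g[r]? with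
  | none => simp
  | some row => by_cases hr : r' = r <;> simp [hr]

lemma len_stepx (pixels : List Int) (width ps y : Int) (g : List (List Int)) (x : Int) :
    (stepx pixels width ps y g x).length = g.length := by
  unfold stepx; split
  · exact len_modify_set ..
  · rfl

lemma rowlen_stepx (pixels : List Int) (width ps y : Int) (g : List (List Int)) (x : Int) (r : Nat) :
    ((stepx pixels width ps y g x).getD r []).length = (g.getD r []).length := by
  unfold stepx; split
  · exact rowlen_modify_set ..
  · rfl

lemma len_foldx (pixels : List Int) (width ps y : Int) :
    ∀ (xs : List Int) (g : List (List Int)),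
      (xs.foldl (stepx pixels width ps y) g).length = g.length := by
  intro xs
  induction xs with
  | nil => intro g; rfl
  | cons a t ih => intro g; rw [List.foldl_cons, ih, len_stepx]

lemma rowlen_foldx (pixels : List Int) (width ps y : Int) :
    ∀ (xs : List Int) (g : List (List Int)) (r : Nat),
      ((xs.foldl (stepx pixels width ps y) g).getD r []).length = (g.getD r []).length := by
  intro xs
  induction xs with
  | nil => intro g r; rfl
  | cons a t ih => intro g r; rw [List.foldl_cons, ih, rowlen_stepx]

lemma fd_nonneg {ps y : Int} (hps : 0 < ps) (hy : 0 ≤ y) : 0 ≤ PySem.Int.floordiv y ps := by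
  rw [PySem.Int.floordiv_eq_ediv_of_pos hps]; exact Int.ediv_nonneg hy (le_of_lt hps)

lemma fd_lt_len (ps b y : Int) (hps : 0 < ps) (hy0 : 0 ≤ y) (hyb : y < b) :
    (PySem.Int.floordiv y ps).toNat < (PySem.List.pyRange 0 b ps).length := by
  have hb : (0:Int) < b := lt_of_le_of_lt hy0 hyb
  rw [PySem.List.pyRange_of_pos 0 b hps, List.length_map, List.length_range, if_pos hb,
    PySem.Int.floordiv_eq_ediv_of_pos hps]
  have h1 : y / ps ≤ (b - 1) / ps := Int.ediv_le_ediv hps (by omega)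
  have h2 : (b - 0 + ps - 1) = (b - 1) + 1 * ps := by ring
  have h3 : ((b - 1) + 1 * ps) / ps = (b - 1) / ps + 1 := Int.add_mul_ediv_right _ _ (by omega)
  have h4 : 0 ≤ y / ps := Int.ediv_nonneg hy0 (le_of_lt hps)
  rw [h2, h3]
  omega

lemma fd_toNat_eq_iff {ps y : Int} (hps : 0 < ps) (hy : 0 ≤ y) (r : Nat) :
    ((PySem.Int.floordiv y ps).toNat = r) ↔ ((r:Int) * ps ≤ y ∧ y < ((r:Int) + 1) * ps) := by
  have h0 := fd_nonneg hps hy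
  constructor
  · intro h
    have he : PySem.Int.floordiv y ps = (r:Int) := by omega
    exact (PySem.Int.floordiv_eq_iff_of_pos hps).mp he
  · intro h
    have he := (PySem.Int.floordiv_eq_iff_of_pos hps).mpr h
    omega

lemma foldx_cell (pixels : List Int) (w h ps y : Int) (hps : 0 < ps) (hy0 : 0 ≤ y) (hyh : y < h) :
    ∀ (xs : List Int) (g : List (List Int)),
    (∀ x ∈ xs, 0 ≤ x ∧ x < w) →
    g.length = (PySem.List.pyRange 0 h ps).length →
    (∀ r : Nat, r < g.length → (g.getD r []).length = (PySem.List.pyRange 0 w ps).length) →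
    ∀ r c : Nat,
    cell (xs.foldl (stepx pixels w ps y) g) r c =
      if (PySem.Int.floordiv y ps).toNat = r ∧
         (∃ x ∈ xs, (PySem.Int.floordiv x ps).toNat = c ∧ PySem.List.pyGetD pixels (y * w + x) 0 = 255)
      then 1 else cell g r c := by
  intro xs
  induction xs with
  | nil => intro g _ _ _ r c; simp
  | cons a t ih =>
    intro g hx hL hC r c
    rw [List.foldl_cons]
    have ha := hx a (List.mem_cons_self ..)
    rw [ih (stepx pixels w ps y g a) (fun x hxm => hx x (List.mem_cons_of_mem _ hxm))
        (by rw [len_stepx]; exact hL)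
        (by intro r' hr'; rw [rowlen_stepx]; exact hC r' (by rwa [len_stepx] at hr')) r c]
    by_cases hpix : PySem.List.pyGetD pixels (y * w + a) 0 = 255
    · have hstep : stepx pixels w ps y g a =
          g.modify (PySem.Int.floordiv y ps).toNat
            (fun row => row.set (PySem.Int.floordiv a ps).toNat 1) := by
        unfold stepx; rw [if_pos (by simpa using hpix)]
      have hr1 : (PySem.Int.floordiv y ps).toNat < g.length := by
        rw [hL]; exact fd_lt_len ps h y hps hy0 hyh
      have hc1 : (PySem.Int.floordiv a ps).toNat <
          (g.getD (PySem.Int.floordiv y ps).toNat []).length := by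
        rw [hC _ hr1]; exact fd_lt_len ps w a hps ha.1 ha.2
      rw [hstep, cell_update g _ _ hr1 hc1 r c]
      by_cases h1 : (PySem.Int.floordiv y ps).toNat = r
      · by_cases h3 : (PySem.Int.floordiv a ps).toNat = c
        · simp [h1, h3, hpix]
        · by_cases h2 : ∃ x ∈ t, (PySem.Int.floordiv x ps).toNat = c ∧
              PySem.List.pyGetD pixels (y * w + x) 0 = 255
          · simp [h1, h2, h3]
          · have h3' : ¬ c = (PySem.Int.floordiv a ps).toNat := fun hh => h3 (Eq.symm hh)
            simp [h1, h2, h3, h3']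
      · have h1' : ¬ r = (PySem.Int.floordiv y ps).toNat := fun hh => h1 (Eq.symm hh)
        simp [h1, h1']
    · have hstep : stepx pixels w ps y g a = g := by
        unfold stepx; rw [if_neg (by simpa using hpix)]
      rw [hstep]
      simp [hpix]

lemma if_or_combine {p q : Prop} [Decidable p] [Decidable q] {a b : Int} :
    (if q then a else if p then a else b) = if p ∨ q then a else b := by
  by_cases hp : p <;> by_cases hq : q <;> simp [hp, hq]

lemma foldy_cell (pixels : List Int) (w h ps : Int) (hps : 0 < ps) :
    ∀ (ys : List Int) (g : List (List Int)),
    (∀ y ∈ ys, 0 ≤ y ∧ y < h) →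
    g.length = (PySem.List.pyRange 0 h ps).length →
    (∀ r : Nat, r < g.length → (g.getD r []).length = (PySem.List.pyRange 0 w ps).length) →
    ∀ r c : Nat,
    cell (ys.foldl (fun g y => (PySem.List.pyRange 0 w 1).foldl (stepx pixels w ps y) g) g) r c =
      if (∃ y ∈ ys, (PySem.Int.floordiv y ps).toNat = r ∧
          ∃ x ∈ PySem.List.pyRange 0 w 1, (PySem.Int.floordiv x ps).toNat = c ∧
            PySem.List.pyGetD pixels (y * w + x) 0 = 255)
      then 1 else cell g r c := by
  intro ys
  induction ys with
  | nil => intro g _ _ _ r c; simp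
  | cons y t ih =>
    intro g hy hL hC r c
    rw [List.foldl_cons]
    have hy1 := hy y (List.mem_cons_self ..)
    rw [ih ((PySem.List.pyRange 0 w 1).foldl (stepx pixels w ps y) g)
        (fun z hz => hy z (List.mem_cons_of_mem _ hz))
        (by rw [len_foldx]; exact hL)
        (by intro r' hr'; rw [rowlen_foldx]; exact hC r' (by rwa [len_foldx] at hr')) r c]
    rw [foldx_cell pixels w h ps y hps hy1.1 hy1.2 (PySem.List.pyRange 0 w 1) g
        (fun x hx => by simpa using (PySem.List.mem_pyRange_one.mp hx)) hL hC r c]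
    simp only [List.exists_mem_cons_iff]
    exact if_or_combine

lemma len_foldy (pixels : List Int) (w ps : Int) :
    ∀ (ys : List Int) (g : List (List Int)),
      (ys.foldl (fun g y => (PySem.List.pyRange 0 w 1).foldl (stepx pixels w ps y) g) g).length
        = g.length := by
  intro ys
  induction ys with
  | nil => intro g; rfl
  | cons a t ih => intro g; rw [List.foldl_cons, ih, len_foldx]

lemma rowlen_foldy (pixels : List Int) (w ps : Int) :
    ∀ (ys : List Int) (g : List (List Int)) (r : Nat),
      ((ys.foldl (fun g y => (PySem.List.pyRange 0 w 1).foldl (stepx pixels w ps y) g) g).getD r []).length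
        = (g.getD r []).length := by
  intro ys
  induction ys with
  | nil => intro g r; rfl
  | cons a t ih => intro g r; rw [List.foldl_cons, ih, rowlen_foldx]

lemma cell_replicate (R C : Nat) (r c : Nat) :
    cell (List.replicate R (List.replicate C (0 : Int))) r c = 0 := by
  simp only [cell, List.getD_eq_getElem?_getD, List.getElem?_replicate]
  split_ifs <;> simp [List.getElem?_replicate] <;> split_ifs <;> simp

lemma cell_eq_getElem (g : List (List Int)) (r c : Nat) (hr : r < g.length)
    (hc : c < (g[r]'hr).length) : (g[r]'hr)[c]'hc = cell g r c := by
  simp [cell, List.getD_eq_getElem?_getD, List.getElem?_eq_getElem, hr, hc]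

lemma getElem_pyRange_pos (b ps : Int) (hps : 0 < ps) (r : Nat)
    (hr : r < (PySem.List.pyRange 0 b ps).length) :
    (PySem.List.pyRange 0 b ps)[r]'hr = ps * r := by
  simp only [PySem.List.pyRange_of_pos 0 b hps] at hr ⊢
  simp only [List.getElem_map, List.getElem_range]
  omega

lemma hit_iff (pixels : List Int) (w h ps : Int) (hps : 0 < ps) (r c : Nat) :
    ((PySem.List.pyRange 0 ps 1).flatMap (fun i =>
        ((PySem.List.pyRange 0 ps 1).filter
          (fun j => decide (ps * (r:Int) + i < h ∧ ps * (c:Int) + j < w))).map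
          (fun j => PySem.List.pyGetD pixels ((ps * (r:Int) + i) * w + (ps * (c:Int) + j)) 0))).any
        (fun pixel => pixel == 255) = true
    ↔ (∃ y ∈ PySem.List.pyRange 0 h 1, (PySem.Int.floordiv y ps).toNat = r ∧
        ∃ x ∈ PySem.List.pyRange 0 w 1, (PySem.Int.floordiv x ps).toNat = c ∧
          PySem.List.pyGetD pixels (y * w + x) 0 = 255) := by
  have hcr : (ps * (r:Int)) = (r:Int) * ps := mul_comm _ _
  have hcc : (ps * (c:Int)) = (c:Int) * ps := mul_comm _ _
  have hr0 : (0:Int) ≤ (r:Int) := Int.natCast_nonneg r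
  have hc0 : (0:Int) ≤ (c:Int) := Int.natCast_nonneg c
  have hpr : (0:Int) ≤ ps * (r:Int) := mul_nonneg (le_of_lt hps) hr0
  have hpc : (0:Int) ≤ ps * (c:Int) := mul_nonneg (le_of_lt hps) hc0
  have hr1 : ((r:Int) + 1) * ps = (r:Int) * ps + ps := by ring
  have hc1 : ((c:Int) + 1) * ps = (c:Int) * ps + ps := by ring
  simp only [List.any_eq_true, List.mem_flatMap, List.mem_map, List.mem_filter,
    PySem.List.mem_pyRange_one, beq_iff_eq, decide_eq_true_eq]
  constructor
  · rintro ⟨p, ⟨i, ⟨hi0, hips⟩, j, ⟨⟨hj0, hjps⟩, hyh, hxw⟩, rfl⟩, hp⟩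
    refine ⟨ps * (r:Int) + i, ⟨by omega, hyh⟩, ?_, ps * (c:Int) + j, ⟨by omega, hxw⟩, ?_, hp⟩
    · rw [fd_toNat_eq_iff hps (by omega)]; omega
    · rw [fd_toNat_eq_iff hps (by omega)]; omega
  · rintro ⟨y, ⟨hy0, hyh⟩, hfy, x, ⟨hx0, hxw⟩, hfx, hp⟩
    rw [fd_toNat_eq_iff hps hy0] at hfy
    rw [fd_toNat_eq_iff hps hx0] at hfx
    refine ⟨PySem.List.pyGetD pixels (y * w + x) 0,
      ⟨y - ps * (r:Int), ⟨by omega, by omega⟩,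
       x - ps * (c:Int), ⟨⟨by omega, by omega⟩, by omega, by omega⟩, ?_⟩, hp⟩
    congr 1
    ring

lemma main_eq (pixels : List Int) (w h ps : Int) (hne : ps ≠ 0) :
    pool_bitmap pixels w h ps = pool_bitmap_alt pixels w h ps := by
  by_cases hpos : 0 < ps ∧ 0 < w
  · obtain ⟨hps, hw⟩ := hpos
    rw [A_eq_map, B_eq, if_pos ⟨hps, hw⟩]
    have hinitlen : (List.replicate (PySem.List.pyRange 0 h ps).length
        (List.replicate (PySem.List.pyRange 0 w ps).length (0:Int))).length
        = (PySem.List.pyRange 0 h ps).length := List.length_replicate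
    have hinitrow : ∀ r : Nat, r < (PySem.List.pyRange 0 h ps).length →
        ((List.replicate (PySem.List.pyRange 0 h ps).length
          (List.replicate (PySem.List.pyRange 0 w ps).length (0:Int))).getD r []).length
        = (PySem.List.pyRange 0 w ps).length := by
      intro r hr
      rw [List.getD_replicate _ hr, List.length_replicate]
    have hBlen : ((PySem.List.pyRange 0 h 1).foldl
        (fun g y => (PySem.List.pyRange 0 w 1).foldl (stepx pixels w ps y) g)
        (List.replicate (PySem.List.pyRange 0 h ps).length
          (List.replicate (PySem.List.pyRange 0 w ps).length (0:Int)))).length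
        = (PySem.List.pyRange 0 h ps).length := by
      rw [len_foldy, hinitlen]
    refine List.ext_getElem (by simpa using hBlen.symm) ?_
    intro r hA hB
    have hrR : r < (PySem.List.pyRange 0 h ps).length := by simpa using hA
    have hBrow : ((PySem.List.pyRange 0 h 1).foldl
        (fun g y => (PySem.List.pyRange 0 w 1).foldl (stepx pixels w ps y) g)
        (List.replicate (PySem.List.pyRange 0 h ps).length
          (List.replicate (PySem.List.pyRange 0 w ps).length (0:Int)))).getD r []
        = ((PySem.List.pyRange 0 h 1).foldl
        (fun g y => (PySem.List.pyRange 0 w 1).foldl (stepx pixels w ps y) g)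
        (List.replicate (PySem.List.pyRange 0 h ps).length
          (List.replicate (PySem.List.pyRange 0 w ps).length (0:Int))))[r]'hB := by
      rw [List.getD_eq_getElem?_getD, List.getElem?_eq_getElem hB, Option.getD_some]
    have hBrowlen : (((PySem.List.pyRange 0 h 1).foldl
        (fun g y => (PySem.List.pyRange 0 w 1).foldl (stepx pixels w ps y) g)
        (List.replicate (PySem.List.pyRange 0 h ps).length
          (List.replicate (PySem.List.pyRange 0 w ps).length (0:Int))))[r]'hB).length
        = (PySem.List.pyRange 0 w ps).length := by
      rw [← hBrow, rowlen_foldy, List.getD_replicate _ hrR, List.length_replicate]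
    refine List.ext_getElem ?_ ?_
    · simpa using hBrowlen.symm
    intro c hc1 hc2
    have hcC : c < (PySem.List.pyRange 0 w ps).length := by rwa [hBrowlen] at hc2
    -- right side: the scattered cell
    rw [cell_eq_getElem _ r c hB hc2]
    rw [foldy_cell pixels w h ps hps (PySem.List.pyRange 0 h 1)
        (List.replicate (PySem.List.pyRange 0 h ps).length
          (List.replicate (PySem.List.pyRange 0 w ps).length (0:Int)))
        (fun y hy => by simpa using (PySem.List.mem_pyRange_one.mp hy))
        hinitlen (by rw [hinitlen]; exact hinitrow) r c]
    rw [cell_replicate]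
    -- left side: the gathered cell
    simp only [List.getElem_map, getElem_pyRange_pos h ps hps r hrR,
      getElem_pyRange_pos w ps hps c (by simpa using hc1)]
    unfold cellA
    rw [if_congr (hit_iff pixels w h ps hps r c) rfl rfl]
  · rw [A_eq_map, B_eq, if_neg hpos]
    by_cases hps : 0 < ps
    · -- positive pool_size but width ≤ 0: every row is empty on both sides
      have hw : ¬ (0:Int) < w := fun hw => hpos ⟨hps, hw⟩
      have hnil : PySem.List.pyRange 0 w ps = [] := by
        rw [PySem.List.pyRange_of_pos 0 w hps, if_neg (by omega), List.range_zero, List.map_nil]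
      simp only [hnil, List.map_nil, List.length_nil, List.replicate_zero]
      exact List.map_const'
    · -- negative pool_size: every block is empty, so every cell is 0 on both sides
      have hneg : ps < 0 := by omega
      have hnil : PySem.List.pyRange 0 ps 1 = [] := PySem.List.pyRange_one_eq_nil (by omega)
      simp only [cellA, hnil, List.flatMap_nil, List.any_nil, if_neg Bool.false_ne_true]
      rw [show (fun (y : Int) => (PySem.List.pyRange 0 w ps).map (fun _ => (0:Int)))
          = (fun _ => List.replicate (PySem.List.pyRange 0 w ps).length (0:Int)) from
        funext (fun y => List.map_const')]
      exact List.map_const'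

-- ===== VERDICT (by name: the statement is the Claim_ definition above) =====
theorem pool_bitmap_spec : Claim_equal_pool_bitmap := by
  intro pixels width height pool_size _ hpre
  exact main_eq pixels width height pool_size hpre.1
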